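-- pv_equiv track=rewrite | github.com/nikita-panacea/pci-compliance-map | pci-mapping-app.py | aggregate_mappings
-- ===== SOURCE A (Python) =====
-- def aggregate_mappings(mapping_lists):
--     """
--     Aggregate mapping objects from multiple sections into a deduplicated dictionary keyed by control code.
--     For duplicate control codes, merge explanations and missing_aspects.
--     """
--     aggregated = {}
--     for mapping in mapping_lists:
--         code = mapping.get("control_code")
--         if not code:
--             continue
--         if code in aggregated:
--             # Merge explanations and missing aspects if not already present.
--             existing_expl = aggregated[code]["explanation"]
--             new_expl = mapping.get("explanation", "")
--             if new_expl and new_expl not in existing_expl: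
--                 aggregated[code]["explanation"] += " " + new_expl
--             existing_missing = aggregated[code]["missing_aspects"]
--             new_missing = mapping.get("missing_aspects", "")
--             if new_missing and new_missing not in existing_missing:
--                 aggregated[code]["missing_aspects"] += " " + new_missing
--         else:
--             aggregated[code] = {
--                 "description": mapping.get("description", ""),
--                 "explanation": mapping.get("explanation", ""),
--                 "missing_aspects": mapping.get("missing_aspects", "")
--             }
--     return aggregated
-- ===== SOURCE B (Python) =====
-- def aggregate_mappings(mapping_lists):
--     """
--     Aggregate mapping objects from multiple sections into a deduplicated dictionary keyed by control code.
--     Group-then-reduce: first bucket the mappings by control code (first-seen order),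
--     then reduce each bucket to one aggregated entry.
--     """
--     groups = {}
--     for mapping in mapping_lists:
--         code = mapping.get("control_code")
--         if code:
--             groups.setdefault(code, []).append(mapping)
--     return {code: _reduce_group(ms) for code, ms in groups.items()}
--
--
-- def _reduce_group(ms):
--     first = ms[0]
--     expl = first.get("explanation", "")
--     missing = first.get("missing_aspects", "")
--     for mapping in ms[1:]:
--         new_expl = mapping.get("explanation", "")
--         if new_expl and new_expl not in expl:
--             expl = expl + " " + new_expl
--         new_missing = mapping.get("missing_aspects", "")
--         if new_missing and new_missing not in missing:
--             missing = missing + " " + new_missing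
--     return {
--         "description": first.get("description", ""),
--         "explanation": expl,
--         "missing_aspects": missing,
--     }
-- ===== Notes on version B (the rewrite author's own statement) =====
-- stated objective: alternative
-- what changed: Replaces A's single accumulating loop over a nested dict with a two-phase group-then-reduce: one pass buckets mappings by control code in first-seen order, then each bucket is independently folded (seeded from its first mapping) into the aggregated entry.
import Mathlib
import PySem

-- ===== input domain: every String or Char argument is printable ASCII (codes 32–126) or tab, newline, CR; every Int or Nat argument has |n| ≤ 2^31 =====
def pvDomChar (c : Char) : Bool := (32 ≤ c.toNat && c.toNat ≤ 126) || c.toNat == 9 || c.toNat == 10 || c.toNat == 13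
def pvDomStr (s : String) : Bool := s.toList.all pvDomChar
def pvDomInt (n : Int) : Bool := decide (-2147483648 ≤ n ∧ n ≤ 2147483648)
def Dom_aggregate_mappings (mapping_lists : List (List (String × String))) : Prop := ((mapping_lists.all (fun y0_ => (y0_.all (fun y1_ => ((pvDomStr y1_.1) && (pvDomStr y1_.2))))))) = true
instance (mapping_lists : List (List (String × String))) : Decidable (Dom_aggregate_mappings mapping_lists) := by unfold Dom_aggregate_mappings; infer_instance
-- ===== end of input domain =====

-- B replaces A's single accumulating loop over a nested dict by a group-then-reduce decomposition
-- (bucket by control code first, then fold each bucket into its aggregated entry); objective: alternative.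

-- shared helper: Python's mapping.get(k) / mapping.get(k, "") on a dict given as an association list (first match)
def mget (m : List (String × String)) (k : String) : Option String :=
  (PySem.Dict.mk m).get? k

def mgetD (m : List (String × String)) (k : String) : String :=
  (mget m k).getD ""

-- ===== PORT A =====
-- loop body of A's single pass; `aggregated[code][...]` lookups are ported with getD, which is exact
-- here because the looked-up keys are always present when that branch runs.
def aggStep (agg : PySem.Dict String (PySem.Dict String String)) (mapping : List (String × String)) :
    PySem.Dict String (PySem.Dict String String) :=
  match mget mapping "control_code" with
  | none => agg
  | some code =>
    if code = "" then agg
    else if agg.contains code then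
      let existing_expl := (agg.getD code PySem.Dict.empty).getD "explanation" ""
      let new_expl := mgetD mapping "explanation"
      let agg1 :=
        if new_expl ≠ "" ∧ PySem.Str.isIn new_expl existing_expl = false then
          agg.modify code PySem.Dict.empty
            (fun e => e.insert "explanation" (existing_expl ++ " " ++ new_expl))
        else agg
      let existing_missing := (agg1.getD code PySem.Dict.empty).getD "missing_aspects" ""
      let new_missing := mgetD mapping "missing_aspects"
      if new_missing ≠ "" ∧ PySem.Str.isIn new_missing existing_missing = false then
        agg1.modify code PySem.Dict.empty
          (fun e => e.insert "missing_aspects" (existing_missing ++ " " ++ new_missing))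
      else agg1
    else
      agg.insert code
        (((PySem.Dict.empty.insert "description" (mgetD mapping "description")).insert
            "explanation" (mgetD mapping "explanation")).insert
          "missing_aspects" (mgetD mapping "missing_aspects"))

def aggregate_mappings (mapping_lists : List (List (String × String))) :
    List (String × List (String × String)) :=
  ((mapping_lists.foldl aggStep PySem.Dict.empty).items.map (fun p => (p.1, p.2.items)))

-- ===== PORT B =====
-- first pass: bucket the mappings by control code (groups.setdefault(code, []).append(mapping))
def groupStep (g : PySem.Dict String (List (List (String × String)))) (mapping : List (String × String)) :
    PySem.Dict String (List (List (String × String))) :=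
  match mget mapping "control_code" with
  | none => g
  | some code =>
    if code = "" then g
    else g.modify code [] (· ++ [mapping])

-- body of _reduce_group's loop
def pairStep (acc : String × String) (mapping : List (String × String)) : String × String :=
  let new_expl := mgetD mapping "explanation"
  let acc1 :=
    if new_expl ≠ "" ∧ PySem.Str.isIn new_expl acc.1 = false then
      (acc.1 ++ " " ++ new_expl, acc.2)
    else acc
  let new_missing := mgetD mapping "missing_aspects"
  if new_missing ≠ "" ∧ PySem.Str.isIn new_missing acc1.2 = false then
    (acc1.1, acc1.2 ++ " " ++ new_missing)
  else acc1

-- _reduce_group: seed from the first mapping of the bucket, fold the rest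
def reduceGroup (ms : List (List (String × String))) : List (String × String) :=
  match ms with
  | [] => []
  | first :: rest =>
    let em := rest.foldl pairStep (mgetD first "explanation", mgetD first "missing_aspects")
    [("description", mgetD first "description"), ("explanation", em.1), ("missing_aspects", em.2)]

def aggregate_mappings_alt (mapping_lists : List (List (String × String))) :
    List (String × List (String × String)) :=
  ((mapping_lists.foldl groupStep PySem.Dict.empty).items.map (fun p => (p.1, reduceGroup p.2)))

-- ===== PRECONDITION & SPEC =====
def Spec_aggregate_mappings (mapping_lists : List (List (String × String))) (out : List (String × List (String × String))) : Prop := out = aggregate_mappings_alt mapping_lists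
instance (mapping_lists : List (List (String × String))) (out : List (String × List (String × String))) : Decidable (Spec_aggregate_mappings mapping_lists out) := by unfold Spec_aggregate_mappings; infer_instance

-- ===== CLAIM (what is proved, stated in full; the proofs are below) =====
def Claim_equal_aggregate_mappings : Prop := ∀ (mapping_lists : List (List (String × String))), Dom_aggregate_mappings mapping_lists → Spec_aggregate_mappings mapping_lists (aggregate_mappings mapping_lists)

-- ===== LEMMAS AND PROOFS =====

-- the aggregated entry of a bucket, as A's inner dict
def entryD (ms : List (List (String × String))) : PySem.Dict String String :=
  match ms with
  | [] => PySem.Dict.empty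
  | first :: rest =>
    let em := rest.foldl pairStep (mgetD first "explanation", mgetD first "missing_aspects")
    ((PySem.Dict.empty.insert "description" (mgetD first "description")).insert
        "explanation" em.1).insert "missing_aspects" em.2

-- the simulation map from B's bucket state to A's aggregated state
def Phi (g : PySem.Dict String (List (List (String × String)))) :
    PySem.Dict String (PySem.Dict String String) :=
  PySem.Dict.mk (g.items.map (fun p => (p.1, entryD p.2)))

theorem phi_contains (g : PySem.Dict String (List (List (String × String)))) (c : String) :
    (Phi g).contains c = g.contains c := by
  simp only [Phi, PySem.Dict.contains, List.any_map]
  rfl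

theorem phi_keys (g : PySem.Dict String (List (List (String × String)))) :
    (Phi g).keys = g.keys := by
  simp [Phi, PySem.Dict.keys, List.map_map, Function.comp]

theorem phi_get? (g : PySem.Dict String (List (List (String × String)))) (c : String) :
    (Phi g).get? c = (g.get? c).map entryD := by
  simp only [Phi, PySem.Dict.get?, List.find?_map, Option.map_map]
  rfl

theorem phi_insert (g : PySem.Dict String (List (List (String × String)))) (c : String)
    (X : List (List (String × String))) :
    Phi (g.insert c X) = (Phi g).insert c (entryD X) := by
  apply PySem.Dict.ext
  simp only [PySem.Dict.insert, phi_contains]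
  by_cases hc : g.contains c = true
  · simp only [hc, if_true, Phi, List.map_map]
    apply List.map_congr_left
    intro p _
    by_cases h : (p.1 == c) = true
    · simp [Function.comp, h]
    · simp [Function.comp, h]
  · simp only [hc, Phi]
    simp

theorem insert_getD_of_contains {κ ν : Type} [BEq κ] [LawfulBEq κ]
    (d : PySem.Dict κ ν) (c : κ) (dflt : ν) (hn : d.keys.Nodup) (hc : d.contains c = true) :
    d.insert c (d.getD c dflt) = d := by
  apply PySem.Dict.ext
  rw [PySem.Dict.items_insert_of_contains _ _ hc]
  have : ∀ p ∈ d.items, (if (p.1 == c) = true then (c, d.getD c dflt) else p) = p := by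
    intro p hp
    by_cases h : (p.1 == c) = true
    · have hpc : p.1 = c := eq_of_beq h
      have hmem : (c, p.2) ∈ d.items := by rw [← hpc]; exact hp
      have hv := PySem.Dict.getD_of_mem_items d hmem hn dflt
      rw [if_pos h, hv, ← hpc]
    · simp [h]
  calc d.items.map (fun p => if (p.1 == c) = true then (c, d.getD c dflt) else p)
      = d.items.map id := List.map_congr_left this
    _ = d.items := List.map_id _

-- A's merge of one more mapping into an existing entry, as one function on the entry
def mergeD (e : PySem.Dict String String) (mapping : List (String × String)) :
    PySem.Dict String String :=
  let E := e.getD "explanation" ""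
  let new_expl := mgetD mapping "explanation"
  let e1 :=
    if new_expl ≠ "" ∧ PySem.Str.isIn new_expl E = false then
      e.insert "explanation" (E ++ " " ++ new_expl)
    else e
  let M := e1.getD "missing_aspects" ""
  let new_missing := mgetD mapping "missing_aspects"
  if new_missing ≠ "" ∧ PySem.Str.isIn new_missing M = false then
    e1.insert "missing_aspects" (M ++ " " ++ new_missing)
  else e1

theorem aggStep_contains (D : PySem.Dict String (PySem.Dict String String))
    (m : List (String × String)) (c : String)
    (hcode : mget m "control_code" = some c) (hc0 : c ≠ "")
    (hn : D.keys.Nodup) (hc : D.contains c = true) :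
    aggStep D m = D.insert c (mergeD (D.getD c PySem.Dict.empty) m) := by
  unfold aggStep mergeD
  rw [hcode]
  simp only [hc0, if_false, hc, if_true, PySem.Dict.modify]
  by_cases h1 : (mgetD m "explanation" ≠ "" ∧
      PySem.Str.isIn (mgetD m "explanation") ((D.getD c PySem.Dict.empty).getD "explanation" "") = false)
  · simp only [if_pos h1, PySem.Dict.getD_insert_self, PySem.Dict.insert_insert_self]
    split_ifs <;> rfl
  · simp only [if_neg h1]
    split_ifs with h2
    · rfl
    · -- neither merge fires: inserting the existing value back is the identity
      rw [insert_getD_of_contains D c PySem.Dict.empty hn hc]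

def mk3 (d E M : String) : PySem.Dict String String :=
  PySem.Dict.mk [("description", d), ("explanation", E), ("missing_aspects", M)]

theorem entryD_cons (first : List (String × String)) (rest : List (List (String × String))) :
    entryD (first :: rest) =
      mk3 (mgetD first "description")
        (rest.foldl pairStep (mgetD first "explanation", mgetD first "missing_aspects")).1
        (rest.foldl pairStep (mgetD first "explanation", mgetD first "missing_aspects")).2 := by
  simp [entryD, mk3, PySem.Dict.insert, PySem.Dict.contains, PySem.Dict.empty]

theorem mk3_getD_e (d E M : String) : (mk3 d E M).getD "explanation" "" = E := by
  simp [mk3, PySem.Dict.getD_eq_get?_getD, PySem.Dict.get?_mk_cons]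

theorem mk3_getD_m (d E M : String) : (mk3 d E M).getD "missing_aspects" "" = M := by
  simp [mk3, PySem.Dict.getD_eq_get?_getD, PySem.Dict.get?_mk_cons]

theorem mk3_ins_e (d E M X : String) : (mk3 d E M).insert "explanation" X = mk3 d X M := by
  simp [mk3, PySem.Dict.insert, PySem.Dict.contains]

theorem mk3_ins_m (d E M X : String) : (mk3 d E M).insert "missing_aspects" X = mk3 d E X := by
  simp [mk3, PySem.Dict.insert, PySem.Dict.contains]

theorem mergeD_mk3 (d E M : String) (m : List (String × String)) :
    mergeD (mk3 d E M) m = mk3 d (pairStep (E, M) m).1 (pairStep (E, M) m).2 := by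
  unfold mergeD pairStep
  simp only [mk3_getD_e]
  by_cases h1 : (mgetD m "explanation" ≠ "" ∧ PySem.Str.isIn (mgetD m "explanation") E = false)
  · simp only [if_pos h1, mk3_ins_e, mk3_getD_m]
    split_ifs <;> simp [mk3_ins_m]
  · simp only [if_neg h1, mk3_getD_m]
    split_ifs <;> simp [mk3_ins_m]

theorem mergeD_entryD (first : List (String × String)) (rest : List (List (String × String)))
    (m : List (String × String)) :
    mergeD (entryD (first :: rest)) m = entryD (first :: (rest ++ [m])) := by
  rw [entryD_cons, entryD_cons, mergeD_mk3, List.foldl_append, List.foldl_cons, List.foldl_nil]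

theorem step_comm (g : PySem.Dict String (List (List (String × String))))
    (m : List (String × String)) (hn : g.keys.Nodup)
    (hne : ∀ p ∈ g.items, p.2 ≠ []) :
    aggStep (Phi g) m = Phi (groupStep g m) := by
  rcases hcode : mget m "control_code" with _ | c
  · unfold aggStep groupStep; rw [hcode]
  · by_cases hc0 : c = ""
    · unfold aggStep groupStep; rw [hcode]; simp [hc0]
    · unfold groupStep
      rw [hcode]
      simp only [hc0, if_false, PySem.Dict.modify]
      by_cases hc : g.contains c = true
      · -- the code is already grouped: both sides update the entry at c
        rcases hgs : g.get? c with _ | gs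
        · rw [PySem.Dict.get?_eq_none_iff_contains] at hgs; rw [hgs] at hc; cases hc
        · have hmem : (c, gs) ∈ g.items := PySem.Dict.mem_items_of_get?_eq_some g hgs
          have hgsne : gs ≠ [] := hne _ hmem
          rcases gs with _ | ⟨first, rest⟩
          · cases hgsne rfl
          · have hPn : (Phi g).keys.Nodup := by rw [phi_keys]; exact hn
            have hPc : (Phi g).contains c = true := by rw [phi_contains]; exact hc
            rw [aggStep_contains (Phi g) m c hcode hc0 hPn hPc]
            have hPgetD : (Phi g).getD c PySem.Dict.empty = entryD (first :: rest) := by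
              rw [PySem.Dict.getD_eq_get?_getD, phi_get?, hgs]; rfl
            have hgetD : g.getD c [] = first :: rest :=
              PySem.Dict.getD_of_get?_eq_some g [] hgs
            rw [hPgetD, mergeD_entryD, hgetD, phi_insert]
            rfl
      · -- new code: both sides append a fresh entry
        have hPc : (Phi g).contains c = false := by rw [phi_contains]; simpa using hc
        have hgetD : g.getD c [] = [] :=
          PySem.Dict.getD_of_not_contains g [] (by simpa using hc)
        unfold aggStep
        rw [hcode]
        simp only [hc0, if_false, hPc, Bool.false_eq_true, if_false]
        rw [hgetD, phi_insert]
        rfl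

theorem groupStep_nodup (g : PySem.Dict String (List (List (String × String))))
    (m : List (String × String)) (hn : g.keys.Nodup) : (groupStep g m).keys.Nodup := by
  unfold groupStep
  rcases mget m "control_code" with _ | c
  · exact hn
  · by_cases hc0 : c = ""
    · simpa [hc0] using hn
    · simp only [hc0, if_false, PySem.Dict.modify]
      exact PySem.Dict.nodup_keys_insert _ _ _ hn

theorem groupStep_ne_nil (g : PySem.Dict String (List (List (String × String))))
    (m : List (String × String)) (hne : ∀ p ∈ g.items, p.2 ≠ []) :
    ∀ p ∈ (groupStep g m).items, p.2 ≠ [] := by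
  unfold groupStep
  rcases mget m "control_code" with _ | c
  · exact hne
  · by_cases hc0 : c = ""
    · simpa [hc0] using hne
    · simp only [hc0, if_false, PySem.Dict.modify]
      intro p hp
      rcases (PySem.Dict.mem_items_insert _ _ _ _).1 hp with h | ⟨h, _⟩
      · subst h; simp
      · exact hne _ h

theorem fold_comm (ms : List (List (String × String)))
    (g : PySem.Dict String (List (List (String × String))))
    (hn : g.keys.Nodup) (hne : ∀ p ∈ g.items, p.2 ≠ []) :
    ms.foldl aggStep (Phi g) = Phi (ms.foldl groupStep g) := by
  induction ms generalizing g with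
  | nil => rfl
  | cons m ms ih =>
    simp only [List.foldl]
    rw [step_comm g m hn hne]
    exact ih _ (groupStep_nodup g m hn) (groupStep_ne_nil g m hne)

theorem entryD_items (gs : List (List (String × String))) :
    (entryD gs).items = reduceGroup gs := by
  rcases gs with _ | ⟨first, rest⟩
  · rfl
  · rw [entryD_cons]; rfl

theorem Phi_empty : Phi PySem.Dict.empty = PySem.Dict.empty := rfl

-- ===== VERDICT (by name: the statement is the Claim_ definition above) =====
theorem aggregate_mappings_spec : Claim_equal_aggregate_mappings := by
  intro ms _
  unfold Spec_aggregate_mappings aggregate_mappings aggregate_mappings_alt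
  rw [← Phi_empty, fold_comm ms PySem.Dict.empty (by simp [PySem.Dict.keys, PySem.Dict.empty]) (by simp [PySem.Dict.empty])]
  generalize (ms.foldl groupStep PySem.Dict.empty) = G
  show (Phi G).items.map (fun p => (p.1, p.2.items)) = G.items.map (fun p => (p.1, reduceGroup p.2))
  simp only [Phi, List.map_map]
  apply List.map_congr_left
  intro p _
  simp [Function.comp, entryD_items]
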